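-- pv_equiv track=rewrite | github.com/rocker-abhi/DSA-455 | step_3/step 3.2/10.py | consequtive_sequence
-- ===== SOURCE A (Python) =====
-- def consequtive_sequence(arr):
--     arr = sorted(arr, reverse=False)
--     consecutive_array = []
--     p = 0
--     q = 1
--
--     while q < len(arr) :
--         found_arr = False
--         if arr[q] - arr[p] == 1:
--             consecutive_array.append(arr[p])
--             while q < len(arr) and arr[q]-arr[p] == 1:
--                 consecutive_array.append(arr[q])
--                 p += 1
--                 q += 1
--         if found_arr :
--             break
--         p += 1
--         q += 1
--
--     return consecutive_array
-- ===== SOURCE B (Python) =====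
-- def consequtive_sequence(arr):
--     s = sorted(arr)
--     runs = []
--     cur = []
--     for x in s:
--         if cur and x - cur[-1] == 1:
--             cur.append(x)
--         else:
--             if cur:
--                 runs.append(cur)
--             cur = [x]
--     if cur:
--         runs.append(cur)
--     result = []
--     for run in runs:
--         if len(run) >= 2:
--             result += run
--     return result
-- ===== Notes on version B (the rewrite author's own statement) =====
-- stated objective: simpler
-- what changed: Replaces A's interleaved two-pointer index scan (outer while with a nested while advancing p,q and emitting as it goes) by a group-then-filter decomposition: one structural pass over the sorted list building maximal difference-1 runs, then a second pass concatenating the runs of length >= 2.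
import Mathlib
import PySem

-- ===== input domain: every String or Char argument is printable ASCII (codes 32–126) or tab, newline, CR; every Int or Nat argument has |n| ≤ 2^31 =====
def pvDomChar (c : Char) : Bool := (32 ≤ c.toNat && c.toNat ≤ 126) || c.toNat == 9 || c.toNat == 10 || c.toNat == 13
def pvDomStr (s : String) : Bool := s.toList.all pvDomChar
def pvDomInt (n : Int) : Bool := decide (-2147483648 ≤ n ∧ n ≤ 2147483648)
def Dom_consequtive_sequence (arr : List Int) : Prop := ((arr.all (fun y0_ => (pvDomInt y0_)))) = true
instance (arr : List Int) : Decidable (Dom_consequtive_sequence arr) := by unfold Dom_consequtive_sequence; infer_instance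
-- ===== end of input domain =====

-- B replaces A's interleaved two-pointer emission by group-maximal-runs-then-filter (objective: simpler).

-- ===== PORT A =====
-- inner while: `while q < len(arr) and arr[q]-arr[p] == 1: consecutive_array.append(arr[q]); p += 1; q += 1`
-- (indices read are always in range — p < q < len(arr) — so getD is exact for Python's arr[i];
--  the loop advances q every iteration, so `arr.length - q` steps of fuel are exactly enough)
def pvInnerAGo (arr : List Int) : Nat → List Int → Nat → Nat → List Int × Nat × Nat
  | 0, acc, p, q => (acc, p, q)
  | fuel + 1, acc, p, q =>
    if q < arr.length then
      if arr.getD q 0 - arr.getD p 0 = 1 then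
        pvInnerAGo arr fuel (acc ++ [arr.getD q 0]) (p + 1) (q + 1)
      else (acc, p, q)
    else (acc, p, q)

def pvInnerA (arr : List Int) (acc : List Int) (p q : Nat) : List Int × Nat × Nat :=
  pvInnerAGo arr (arr.length - q) acc p q

-- outer while: `while q < len(arr): found_arr = False; if arr[q]-arr[p]==1: ...; if found_arr: break; p += 1; q += 1`
def pvOuterAGo (arr : List Int) : Nat → List Int → Nat → Nat → List Int
  | 0, acc, _, _ => acc
  | fuel + 1, acc, p, q =>
    if q < arr.length then
      let found_arr := false
      if arr.getD q 0 - arr.getD p 0 = 1 then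
        let r := pvInnerA arr (acc ++ [arr.getD p 0]) p q
        if found_arr then r.1
        else pvOuterAGo arr fuel r.1 (r.2.1 + 1) (r.2.2 + 1)
      else
        if found_arr then acc
        else pvOuterAGo arr fuel acc (p + 1) (q + 1)
    else acc

def pvOuterA (arr : List Int) (acc : List Int) (p q : Nat) : List Int :=
  pvOuterAGo arr (arr.length - q) acc p q

def consequtive_sequence (arr : List Int) : List Int :=
  pvOuterA (PySem.List.sorted arr (fun x => x) false) [] 0 1

-- ===== PORT B =====
-- `for x in s:` building runs: extend cur when x - cur[-1] == 1, else flush cur and start [x]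
def pvGroupLoop (xs : List Int) (runs : List (List Int)) (cur : List Int) : List (List Int) :=
  match xs with
  | [] => match cur with
          | [] => runs
          | _ => runs ++ [cur]
  | x :: rest =>
    match cur.getLast? with
    | some last =>
      if x - last = 1 then pvGroupLoop rest runs (cur ++ [x])
      else pvGroupLoop rest (runs ++ [cur]) [x]
    | none => pvGroupLoop rest runs [x]

def consequtive_sequence_alt (arr : List Int) : List Int :=
  let runs := pvGroupLoop (PySem.List.sorted arr (fun x => x) false) [] []
  runs.foldl (fun res run => if 2 ≤ run.length then res ++ run else res) []

-- ===== PRECONDITION & SPEC =====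
def Spec_consequtive_sequence (arr : List Int) (out : List Int) : Prop := out = consequtive_sequence_alt arr
instance (arr : List Int) (out : List Int) : Decidable (Spec_consequtive_sequence arr out) := by unfold Spec_consequtive_sequence; infer_instance

-- ===== CLAIM (what is proved, stated in full; the proofs are below) =====
def Claim_equal_consequtive_sequence : Prop := ∀ (arr : List Int), Dom_consequtive_sequence arr → Spec_consequtive_sequence arr (consequtive_sequence arr)

-- ===== LEMMAS AND PROOFS =====

-- split a list into the maximal chain of successive +1 steps after `prev`, and the rest
def chainSplit (prev : Int) : List Int → List Int × List Int
  | [] => ([], [])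
  | x :: rest =>
    if x - prev = 1 then ((x :: (chainSplit x rest).1), (chainSplit x rest).2)
    else ([], x :: rest)

theorem chainSplit_snd_len (prev : Int) (l : List Int) :
    (chainSplit prev l).2.length ≤ l.length := by
  induction l generalizing prev with
  | nil => simp [chainSplit]
  | cons x rest ih =>
    simp only [chainSplit]
    split
    · exact le_trans (ih x) (by simp)
    · simp

theorem chainSplit_snd_drop (prev : Int) (l : List Int) :
    (chainSplit prev l).2 = l.drop (chainSplit prev l).1.length := by
  induction l generalizing prev with
  | nil => simp [chainSplit]
  | cons x rest ih =>
    simp only [chainSplit]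
    split
    · simpa using ih x
    · simp

-- what A emits, phrased over the list structure
def emitA : List Int → List Int
  | a :: b :: rest =>
    if b - a = 1 then
      (a :: b :: (chainSplit b rest).1) ++ emitA (chainSplit b rest).2
    else emitA (b :: rest)
  | _ => []
termination_by l => l.length
decreasing_by
  · have := chainSplit_snd_len b rest; simp; omega
  · simp

-- the maximal runs of the list
def groupsB : List Int → List (List Int)
  | [] => []
  | x :: rest => (x :: (chainSplit x rest).1) :: groupsB (chainSplit x rest).2
termination_by l => l.length
decreasing_by
  have := chainSplit_snd_len x rest; simp; omega

-- concatenation of the runs of length ≥ 2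
def joinBig : List (List Int) → List Int
  | [] => []
  | r :: rs => (if 2 ≤ r.length then r else []) ++ joinBig rs

theorem foldl_joinBig (rs : List (List Int)) (acc : List Int) :
    rs.foldl (fun res run => if 2 ≤ run.length then res ++ run else res) acc
      = acc ++ joinBig rs := by
  induction rs generalizing acc with
  | nil => simp [joinBig]
  | cons r rs ih => simp only [List.foldl, joinBig, ih]; split <;> simp

-- the inner while computes the chain split, index-wise
theorem pvInnerAGo_eq (arr : List Int) : ∀ k p acc, arr.length - (p + 1) ≤ k →
    pvInnerAGo arr k acc p (p + 1) =
      (acc ++ (chainSplit (arr.getD p 0) (arr.drop (p + 1))).1,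
       p + (chainSplit (arr.getD p 0) (arr.drop (p + 1))).1.length,
       p + 1 + (chainSplit (arr.getD p 0) (arr.drop (p + 1))).1.length) := by
  intro k
  induction k with
  | zero =>
    intro p acc h
    have hd : arr.drop (p + 1) = [] := List.drop_eq_nil_of_le (by omega)
    rw [pvInnerAGo, hd]
    simp [chainSplit]
  | succ k ih =>
    intro p acc h
    by_cases hq : p + 1 < arr.length
    · have hdrop : arr.drop (p + 1) = arr.getD (p + 1) 0 :: arr.drop (p + 2) := by
        rw [List.drop_eq_getElem_cons hq, List.getD_eq_getElem _ _ hq]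
      rw [pvInnerAGo, if_pos hq]
      by_cases hc : arr.getD (p + 1) 0 - arr.getD p 0 = 1
      · rw [if_pos hc]
        have hrec := ih (p + 1) (acc ++ [arr.getD (p + 1) 0]) (by omega)
        rw [hrec]
        have hchain : chainSplit (arr.getD p 0) (arr.drop (p + 1)) =
            (arr.getD (p + 1) 0 :: (chainSplit (arr.getD (p + 1) 0) (arr.drop (p + 1 + 1))).1,
             (chainSplit (arr.getD (p + 1) 0) (arr.drop (p + 1 + 1))).2) := by
          rw [hdrop]; simp only [chainSplit, if_pos hc]
        rw [hchain]
        simp only [Prod.mk.injEq, List.length_cons]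
        refine ⟨by simp, by omega, by omega⟩
      · rw [if_neg hc]
        have hchain : chainSplit (arr.getD p 0) (arr.drop (p + 1)) =
            ([], arr.getD (p + 1) 0 :: arr.drop (p + 2)) := by
          rw [hdrop]; simp only [chainSplit, if_neg hc]
        rw [hchain]; simp
    · have hd : arr.drop (p + 1) = [] := List.drop_eq_nil_of_le (by omega)
      rw [pvInnerAGo, if_neg hq, hd]
      simp [chainSplit]

theorem pvInnerA_eq (arr : List Int) (p : Nat) (acc : List Int) :
    pvInnerA arr acc p (p + 1) =
      (acc ++ (chainSplit (arr.getD p 0) (arr.drop (p + 1))).1,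
       p + (chainSplit (arr.getD p 0) (arr.drop (p + 1))).1.length,
       p + 1 + (chainSplit (arr.getD p 0) (arr.drop (p + 1))).1.length) :=
  pvInnerAGo_eq arr (arr.length - (p + 1)) p acc (le_refl _)

-- the outer while emits emitA of the remaining suffix
theorem emitA_nil : emitA [] = [] := by (rw [emitA]; intros; simp_all)

theorem emitA_single (a : Int) : emitA [a] = [] := by (rw [emitA]; intros; simp_all)

theorem pvOuterAGo_eq (arr : List Int) : ∀ k p acc, arr.length - (p + 1) ≤ k →
    pvOuterAGo arr k acc p (p + 1) = acc ++ emitA (arr.drop p) := by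
  intro k
  induction k with
  | zero =>
    intro p acc h
    have hd : arr.drop p = [] ∨ ∃ a, arr.drop p = [a] := by
      rcases l : arr.drop p with _ | ⟨a, t⟩
      · exact Or.inl rfl
      · rcases t with _ | ⟨b, t2⟩
        · exact Or.inr ⟨a, rfl⟩
        · exfalso
          have := congrArg List.length l
          simp at this; omega
    rw [pvOuterAGo]
    rcases hd with hd | ⟨a, hd⟩ <;> rw [hd] <;> simp [emitA_nil, emitA_single]
  | succ k ih =>
    intro p acc h
    by_cases hq : p + 1 < arr.length
    · have hp : p < arr.length := by omega
      have hdrop : arr.drop p = arr.getD p 0 :: arr.drop (p + 1) := by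
        rw [List.drop_eq_getElem_cons hp, List.getD_eq_getElem _ _ hp]
      have hdrop1 : arr.drop (p + 1) = arr.getD (p + 1) 0 :: arr.drop (p + 2) := by
        rw [List.drop_eq_getElem_cons hq, List.getD_eq_getElem _ _ hq]
      rw [pvOuterAGo, if_pos hq]
      by_cases hc : arr.getD (p + 1) 0 - arr.getD p 0 = 1
      · rw [if_pos hc]
        simp only [if_neg (by decide : ¬ (false = true))]
        rw [pvInnerA_eq arr p (acc ++ [arr.getD p 0])]
        have hchain : chainSplit (arr.getD p 0) (arr.drop (p + 1)) =
            (arr.getD (p + 1) 0 :: (chainSplit (arr.getD (p + 1) 0) (arr.drop (p + 2))).1,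
             (chainSplit (arr.getD (p + 1) 0) (arr.drop (p + 2))).2) := by
          rw [hdrop1]; simp only [chainSplit, if_pos hc]
        set c2 := (chainSplit (arr.getD (p + 1) 0) (arr.drop (p + 2))).1 with hc2
        rw [hchain]
        dsimp only
        have hb1 : p + (arr.getD (p + 1) 0 :: c2).length + 1 = p + c2.length + 2 := by
          simp; omega
        have hb2 : p + 1 + (arr.getD (p + 1) 0 :: c2).length + 1 = p + c2.length + 2 + 1 := by
          simp; omega
        rw [hb1, hb2]
        have hrec := ih (p + c2.length + 2) (acc ++ [arr.getD p 0] ++ (arr.getD (p + 1) 0 :: c2))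
          (by omega)
        rw [show p + c2.length + 2 + 1 = p + c2.length + 2 + 1 from rfl, hrec]
        have hsnd : (chainSplit (arr.getD (p + 1) 0) (arr.drop (p + 2))).2
            = arr.drop (p + c2.length + 2) := by
          rw [chainSplit_snd_drop, ← hc2, List.drop_drop]; congr 1; omega
        have hemit : emitA (arr.drop p)
            = (arr.getD p 0 :: arr.getD (p + 1) 0 :: c2) ++ emitA (arr.drop (p + c2.length + 2)) := by
          rw [hdrop, hdrop1, emitA, if_pos hc, ← hc2, hsnd]
        rw [hemit]
        simp
      · rw [if_neg hc]
        simp only [if_neg (by decide : ¬ (false = true))]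
        have hrec := ih (p + 1) acc (by omega)
        rw [hrec]
        have hE : emitA (arr.drop p) = emitA (arr.drop (p + 1)) := by
          rw [hdrop, hdrop1, emitA, if_neg hc]
        rw [hE]
    · rw [pvOuterAGo, if_neg hq]
      have hlen : (arr.drop p).length ≤ 1 := by simp; omega
      rcases l : arr.drop p with _ | ⟨a, t⟩
      · rw [emitA_nil]; simp
      · rcases t with _ | ⟨b, t2⟩
        · rw [emitA_single]; simp
        · rw [l] at hlen; simp at hlen

theorem pvOuterA_eq (arr : List Int) (p : Nat) (acc : List Int) :
    pvOuterA arr acc p (p + 1) = acc ++ emitA (arr.drop p) :=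
  pvOuterAGo_eq arr (arr.length - (p + 1)) p acc (le_refl _)

-- B's loop computes the runs: invariant over (runs, cur)
theorem pvGroupLoop_eq (xs : List Int) : ∀ runs cur prev, cur.getLast? = some prev →
    pvGroupLoop xs runs cur
      = runs ++ ((cur ++ (chainSplit prev xs).1) :: groupsB (chainSplit prev xs).2) := by
  induction xs with
  | nil =>
    intro runs cur prev hl
    rcases cur with _ | ⟨c, cs⟩
    · simp at hl
    · simp [pvGroupLoop, chainSplit, groupsB]
  | cons x rest ih =>
    intro runs cur prev hl
    rw [pvGroupLoop, hl]
    dsimp only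
    by_cases hc : x - prev = 1
    · rw [if_pos hc]
      have hl2 : (cur ++ [x]).getLast? = some x := by simp
      rw [ih runs (cur ++ [x]) x hl2]
      simp [chainSplit, hc]
    · rw [if_neg hc]
      have hl2 : ([x] : List Int).getLast? = some x := by simp
      rw [ih (runs ++ [cur]) [x] x hl2]
      simp [chainSplit, hc, groupsB]

theorem pvGroupLoop_start (xs : List Int) (runs : List (List Int)) :
    pvGroupLoop xs runs [] = runs ++ groupsB xs := by
  rcases xs with _ | ⟨x, rest⟩
  · simp [pvGroupLoop, groupsB]
  · rw [pvGroupLoop]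
    simp only [List.getLast?_nil]
    rw [pvGroupLoop_eq rest runs [x] x (by simp)]
    simp [groupsB]

-- A's emission equals the concatenation of runs of length ≥ 2
theorem emitA_eq_joinBig : ∀ k (l : List Int), l.length ≤ k →
    emitA l = joinBig (groupsB l) := by
  intro k
  induction k with
  | zero =>
    intro l h
    have : l = [] := List.eq_nil_of_length_eq_zero (by omega)
    subst this; simp [emitA, groupsB, joinBig]
  | succ k ih =>
    intro l h
    rcases l with _ | ⟨a, t⟩
    · simp [emitA, groupsB, joinBig]
    rcases t with _ | ⟨b, rest⟩
    · simp [emitA, groupsB, chainSplit, joinBig]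
    by_cases hc : b - a = 1
    · rw [emitA, if_pos hc]
      have hg : groupsB (a :: b :: rest)
          = (a :: b :: (chainSplit b rest).1) :: groupsB ((chainSplit b rest).2) := by
        rw [groupsB]; simp [chainSplit, hc]
      rw [hg, joinBig, if_pos (by simp)]
      have := chainSplit_snd_len b rest
      rw [ih ((chainSplit b rest).2) (by simp at h; omega)]
    · rw [emitA, if_neg hc]
      have hg : groupsB (a :: b :: rest) = [a] :: groupsB (b :: rest) := by
        rw [groupsB]; simp [chainSplit, hc]
      rw [hg, joinBig, if_neg (by simp)]
      rw [ih (b :: rest) (by simp at h ⊢; omega)]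
      simp

-- ===== VERDICT (by name: the statement is the Claim_ definition above) =====
theorem consequtive_sequence_spec : Claim_equal_consequtive_sequence := by
  intro arr _
  unfold Spec_consequtive_sequence consequtive_sequence consequtive_sequence_alt
  set s := PySem.List.sorted arr (fun x => x) false with hs
  rw [show (1 : Nat) = 0 + 1 from rfl, pvOuterA_eq s 0 []]
  rw [pvGroupLoop_start, foldl_joinBig]
  simp [emitA_eq_joinBig s.length s (le_refl _)]
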